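-- pv_equiv track=rewrite | github.com/theokong428/topic-2 | src/data_loader.py | generate_timeslots
-- ===== SOURCE A (Python) =====
-- from typing import Dict, List, Tuple, Optional
--
-- def generate_timeslots(hours_policy: Dict[str, Tuple[int, int]],
--                        granularity_min: int = 30) -> List[Tuple[str, int, int]]:
--     """
--     Generate all valid (day, hour, minute) timeslots under a given hours policy.
--     Parameters: hours_policy {Day: (start_h, end_h)}, granularity_min (default 30).
--     Example: generate_timeslots({"Monday": (9, 11)}, 30) -> [("Monday", 9, 0), ...]
--     """
--     slots = []
--     for day, (start_h, end_h) in hours_policy.items():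
--         h, m = start_h, 0
--         while h + m / 60 < end_h:
--             slots.append((day, h, m))
--             m += granularity_min
--             if m >= 60:
--                 h += 1
--                 m = 0
--     return slots
-- ===== SOURCE B (Python) =====
-- def generate_timeslots(hours_policy, granularity_min=30):
--     """Per day: every full hour in [start_h, end_h) paired with the minute
--     multiples of granularity_min below 60 -- no stateful carry, no floats."""
--     return [(day, h, m)
--             for day, (start_h, end_h) in hours_policy.items()
--             for h in range(start_h, end_h)
--             for m in range(0, 60, granularity_min)]
-- ===== Notes on version B (the rewrite author's own statement) =====
-- stated objective: simpler
-- what changed: Replaces A's stateful while-loop with an hour/minute carry and a float comparison by a stateless nested comprehension: every hour in range(start_h, end_h) paired with every minute in range(0, 60, granularity_min).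
import Mathlib
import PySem

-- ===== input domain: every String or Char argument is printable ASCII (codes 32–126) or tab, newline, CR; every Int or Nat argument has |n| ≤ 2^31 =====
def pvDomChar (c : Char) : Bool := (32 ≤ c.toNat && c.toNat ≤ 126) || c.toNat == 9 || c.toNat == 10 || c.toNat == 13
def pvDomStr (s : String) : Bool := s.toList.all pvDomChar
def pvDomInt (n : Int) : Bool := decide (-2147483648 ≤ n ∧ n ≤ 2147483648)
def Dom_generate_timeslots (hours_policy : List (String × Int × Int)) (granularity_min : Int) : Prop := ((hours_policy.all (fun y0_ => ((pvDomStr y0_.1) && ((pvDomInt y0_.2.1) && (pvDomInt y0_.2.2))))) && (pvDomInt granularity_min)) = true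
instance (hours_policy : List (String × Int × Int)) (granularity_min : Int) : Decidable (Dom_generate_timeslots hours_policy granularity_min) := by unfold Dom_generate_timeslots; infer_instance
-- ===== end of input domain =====

-- B replaces A's stateful hour/minute carry and float comparison by a nested
-- range comprehension (hours × minute multiples below 60); equal return value on Pre_.

-- ===== PORT A =====
-- A's while-loop, made total with fuel (the caller passes provably sufficient fuel
-- whenever Pre_ holds).  The float test `h + m/60 < end_h` is ported as the exact
-- integer comparison `60*h + m < 60*end_h`, which it equals for all values the
-- loop reaches on Dom (all quantities stay far below 2^53, and m/60 incurs an
-- error < 1e-8 while the compared quantities differ by at least 1/60 when unequal).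
def pvLoopA (day : String) (end_h g : Int) : Nat → Int → Int → List (String × Int × Int) → List (String × Int × Int)
  | 0, _, _, slots => slots
  | fuel+1, h, m, slots =>
    if 60 * h + m < 60 * end_h then
      pvLoopA day end_h g fuel (if m + g ≥ 60 then h + 1 else h) (if m + g ≥ 60 then 0 else m + g)
        (slots ++ [(day, h, m)])
    else slots

def generate_timeslots (hours_policy : List (String × Int × Int)) (granularity_min : Int) : List (String × Int × Int) :=
  hours_policy.foldl
    (fun slots dse =>
      pvLoopA dse.1 dse.2.2 granularity_min (((dse.2.2 - dse.2.1) * 60).toNat + 1) dse.2.1 0 slots)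
    []

-- ===== PORT B =====
def generate_timeslots_alt (hours_policy : List (String × Int × Int)) (granularity_min : Int) : List (String × Int × Int) :=
  hours_policy.flatMap (fun dse =>
    (PySem.List.pyRange dse.2.1 dse.2.2 1).flatMap (fun h =>
      (PySem.List.pyRange 0 60 granularity_min).map (fun m => (dse.1, h, m))))

-- ===== PRECONDITION & SPEC =====
-- Pre_ excludes exactly the inputs on which Python A never returns: with
-- granularity_min ≤ 0 and some day whose start_h < end_h the while-loop runs forever
-- (and B's range(0, 60, 0) would raise ValueError there).  A returns on every input
-- admitted here.
def Pre_generate_timeslots (hours_policy : List (String × Int × Int)) (granularity_min : Int) : Prop :=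
  0 < granularity_min ∨ ∀ dse ∈ hours_policy, dse.2.2 ≤ dse.2.1
instance (hours_policy : List (String × Int × Int)) (granularity_min : Int) : Decidable (Pre_generate_timeslots hours_policy granularity_min) := by unfold Pre_generate_timeslots; infer_instance

def pvWitness_generate_timeslots : (List (String × Int × Int)) × Int := ([("Monday", 9, 11)], 30)

def Spec_generate_timeslots (hours_policy : List (String × Int × Int)) (granularity_min : Int) (out : List (String × Int × Int)) : Prop := out = generate_timeslots_alt hours_policy granularity_min
instance (hours_policy : List (String × Int × Int)) (granularity_min : Int) (out : List (String × Int × Int)) : Decidable (Spec_generate_timeslots hours_policy granularity_min out) := by unfold Spec_generate_timeslots; infer_instance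

-- ===== CLAIM (what is proved, stated in full; the proofs are below) =====
def Claim_equal_generate_timeslots : Prop := ∀ (hours_policy : List (String × Int × Int)) (granularity_min : Int), Dom_generate_timeslots hours_policy granularity_min → Pre_generate_timeslots hours_policy granularity_min → Spec_generate_timeslots hours_policy granularity_min (generate_timeslots hours_policy granularity_min)

-- ===== LEMMAS AND PROOFS =====

-- B's slots for one day, starting at hour h (B's inner two loops).
def pvHoursB (day : String) (h e g : Int) : List (String × Int × Int) :=
  (PySem.List.pyRange h e 1).flatMap (fun hh =>
    (PySem.List.pyRange 0 60 g).map (fun m => (day, hh, m)))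

lemma alt_eq_flatMap (hp : List (String × Int × Int)) (g : Int) :
    generate_timeslots_alt hp g = hp.flatMap (fun dse => pvHoursB dse.1 dse.2.1 dse.2.2 g) := rfl

-- cons/nil unfolding of range(a, b, g) for a positive general step g
lemma pyRange_pos_nil (a b g : Int) (hg : 0 < g) (h : b ≤ a) :
    PySem.List.pyRange a b g = [] := by
  rw [PySem.List.pyRange_of_pos a b hg, if_neg (by omega)]
  simp

lemma pyRange_pos_cons (a b g : Int) (hg : 0 < g) (h : a < b) :
    PySem.List.pyRange a b g = a :: PySem.List.pyRange (a + g) b g := by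
  rw [PySem.List.pyRange_of_pos a b hg, PySem.List.pyRange_of_pos (a + g) b hg,
    if_pos h]
  have h1 : (b - a + g - 1) / g = (b - a - 1) / g + 1 := by
    rw [show b - a + g - 1 = (b - a - 1) + 1 * g by ring,
      Int.add_mul_ediv_right (b - a - 1) 1 (by omega : g ≠ 0)]
  have h2 : 0 ≤ (b - a - 1) / g := Int.ediv_nonneg (by omega) (by omega)
  by_cases hb : a + g < b
  · rw [if_pos hb]
    have : (b - a + g - 1) / g = (b - (a + g) + g - 1) / g + 1 := by
      rw [h1]; congr 1; congr 1; ring_nf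
    rw [this]
    have h3 : 0 ≤ (b - (a + g) + g - 1) / g := Int.ediv_nonneg (by omega) (by omega)
    rw [Int.toNat_add h3 (by omega), Int.toNat_one, List.range_succ_eq_map, List.map_cons,
      List.map_map]
    congr 1
    · simp
    · congr 1
      funext k
      simp only [Function.comp]
      push_cast
      ring
  · rw [if_neg hb]
    have hlt : b - a - 1 < g := by omega
    have : (b - a - 1) / g = 0 := Int.ediv_eq_zero_of_lt (by omega) hlt
    rw [h1, this]
    simp

lemma pvHoursB_unfold (day : String) (h e g : Int) :
    pvHoursB day h e g =
      if h < e then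
        (PySem.List.pyRange 0 60 g).map (fun m => (day, h, m)) ++ pvHoursB day (h + 1) e g
      else [] := by
  unfold pvHoursB
  by_cases hh : h < e
  · rw [if_pos hh, PySem.List.pyRange_one_cons hh, List.flatMap_cons]
  · rw [if_neg hh, PySem.List.pyRange_one_eq_nil (by omega), List.flatMap_nil]

-- A's minute/hour carry loop, for positive granularity, from any in-range minute state
lemma pvLoopA_spec (day : String) (e g : Int) (hg : 0 < g) :
    ∀ (fuel : Nat) (h m : Int) (slots : List (String × Int × Int)),
      0 ≤ m → m < 60 → (e - h) * 60 - m < (fuel : Int) →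
      pvLoopA day e g fuel h m slots =
        slots ++ (if h < e then
            (PySem.List.pyRange m 60 g).map (fun mm => (day, h, mm)) ++ pvHoursB day (h + 1) e g
          else []) := by
  intro fuel
  induction fuel with
  | zero =>
    intro h m slots hm0 hm60 hfuel
    have : ¬ h < e := by
      intro hlt
      have : (e - h) * 60 ≥ 60 := by nlinarith
      simp at hfuel; omega
    simp [pvLoopA, this]
  | succ fuel ih =>
    intro h m slots hm0 hm60 hfuel
    by_cases hc : 60 * h + m < 60 * e
    · have hhe : h < e := by nlinarith
      push_cast at hfuel
      by_cases hcar : m + g ≥ 60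
      · rw [show pvLoopA day e g (fuel+1) h m slots
              = pvLoopA day e g fuel (h+1) 0 (slots ++ [(day, h, m)]) by
            simp [pvLoopA, hc, hcar]]
        rw [ih (h+1) 0 _ le_rfl (by omega) (by nlinarith)]
        rw [if_pos hhe, pyRange_pos_cons m 60 g hg hm60,
          pyRange_pos_nil (m + g) 60 g hg (by omega),
          pvHoursB_unfold day (h+1) e g]
        simp
      · rw [show pvLoopA day e g (fuel+1) h m slots
              = pvLoopA day e g fuel h (m+g) (slots ++ [(day, h, m)]) by
            simp [pvLoopA, hc, hcar]]
        rw [ih h (m+g) _ (by omega) (by omega) (by omega)]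
        rw [if_pos hhe, if_pos hhe, pyRange_pos_cons m 60 g hg hm60]
        simp
    · have hhe : ¬ h < e := by nlinarith
      simp [pvLoopA, hc, hhe]

lemma pvLoopA_day (day : String) (s e g : Int) (hg : 0 < g) (slots : List (String × Int × Int)) :
    pvLoopA day e g (((e - s) * 60).toNat + 1) s 0 slots = slots ++ pvHoursB day s e g := by
  rw [pvLoopA_spec day e g hg _ s 0 slots le_rfl (by omega) (by omega)]
  rw [pvHoursB_unfold day s e g]

theorem generate_timeslots_spec : Claim_equal_generate_timeslots := by
  intro hp g _ hpre
  unfold Spec_generate_timeslots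
  rw [alt_eq_flatMap]
  rcases hpre with hg | hall
  · -- positive granularity: fold the per-day lemma through the list
    suffices h : ∀ (l : List (String × Int × Int)) (slots : List (String × Int × Int)),
        l.foldl (fun slots dse =>
          pvLoopA dse.1 dse.2.2 g (((dse.2.2 - dse.2.1) * 60).toNat + 1) dse.2.1 0 slots) slots
        = slots ++ l.flatMap (fun dse => pvHoursB dse.1 dse.2.1 dse.2.2 g) by
      simpa using h hp []
    intro l
    induction l with
    | nil => simp
    | cons d l ih =>
      intro slots
      simp only [List.foldl_cons, List.flatMap_cons, pvLoopA_day d.1 d.2.1 d.2.2 g hg, ih,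
        List.append_assoc]
  · -- every day empty (end ≤ start): both sides collapse to the accumulator
    suffices h : ∀ (l : List (String × Int × Int)), (∀ dse ∈ l, dse.2.2 ≤ dse.2.1) →
        ∀ (slots : List (String × Int × Int)),
        l.foldl (fun slots dse =>
          pvLoopA dse.1 dse.2.2 g (((dse.2.2 - dse.2.1) * 60).toNat + 1) dse.2.1 0 slots) slots
        = slots ++ l.flatMap (fun dse => pvHoursB dse.1 dse.2.1 dse.2.2 g) by
      simpa using h hp hall []
    intro l hl
    induction l with
    | nil => simp
    | cons d l ih =>
      intro slots
      have hd : d.2.2 ≤ d.2.1 := hl d (by simp)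
      have hstep : pvLoopA d.1 d.2.2 g (((d.2.2 - d.2.1) * 60).toNat + 1) d.2.1 0 slots = slots := by
        simp only [pvLoopA]
        rw [if_neg (by omega)]
      have hday : pvHoursB d.1 d.2.1 d.2.2 g = [] := by
        unfold pvHoursB
        rw [PySem.List.pyRange_one_eq_nil hd, List.flatMap_nil]
      simp only [List.foldl_cons, List.flatMap_cons, hstep, hday,
        ih (fun x hx => hl x (by simp [hx])), List.nil_append]
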